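-- pv_equiv track=rewrite | github.com/aikikode/adventofcode | 2021/day_15/chiton.py | extend_data
-- ===== SOURCE A (Python) =====
-- from typing import List, Tuple
--
-- def extend_data(data: List[List[int]]) -> List[List[int]]:
--     def increase(val: int) -> int:
--         return 1 if val >= 9 else val + 1
--
--     old_limit = len(data)
--     new_limit = 5 * old_limit
--     extended_data = [[0] * new_limit for _ in range(new_limit)]
--     for i in range(new_limit):
--         for j in range(new_limit):
--             if i < old_limit and j < old_limit:
--                 extended_data[i][j] = data[i][j]
--                 continue
--             if j >= old_limit:
--                 extended_data[i][j] = increase(extended_data[i][j - old_limit])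
--             else:
--                 extended_data[i][j] = increase(extended_data[i - old_limit][j])
--     return extended_data
-- ===== SOURCE B (Python) =====
-- def extend_data(data):
--     def increase(val):
--         return 1 if val >= 9 else val + 1
--
--     def boosted(val, times):
--         for _ in range(times):
--             val = increase(val)
--         return val
--
--     n = len(data)
--     return [[boosted(data[i % n][j % n], i // n + j // n)
--              for j in range(5 * n)]
--             for i in range(5 * n)]
-- ===== Notes on version B (the rewrite author's own statement) =====
-- stated objective: simpler
-- what changed: Replaces A's in-place 5nx5n grid filled by chained neighbour propagation (each cell derived from the previously written cell one tile left/up) with a direct comprehension that computes every output cell independently as `increase` iterated (i//n + j//n) times on data[i%n][j%n].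
import Mathlib
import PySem

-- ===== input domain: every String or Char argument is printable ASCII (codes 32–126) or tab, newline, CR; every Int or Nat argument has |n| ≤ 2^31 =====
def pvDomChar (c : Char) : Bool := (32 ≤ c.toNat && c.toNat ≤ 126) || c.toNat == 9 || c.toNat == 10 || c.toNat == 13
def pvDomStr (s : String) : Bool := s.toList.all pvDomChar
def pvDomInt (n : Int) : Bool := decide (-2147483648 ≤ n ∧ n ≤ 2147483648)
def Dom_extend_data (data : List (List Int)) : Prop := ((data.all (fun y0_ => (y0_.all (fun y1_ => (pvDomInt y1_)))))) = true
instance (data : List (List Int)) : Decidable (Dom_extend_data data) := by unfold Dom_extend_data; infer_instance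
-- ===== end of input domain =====

-- B replaces A's chained in-place neighbour propagation over the 5n×5n grid by a direct
-- comprehension computing each output cell independently (`increase` iterated i//n + j//n times).


-- ===== PORT A =====
-- the inner helper `increase` (shared by both Pythons)
def increaseA (val : Int) : Int := if val ≥ 9 then 1 else val + 1

-- extended_data[i][j] read / write (indices here are always nonnegative range indices)
def pvGet2 (g : List (List Int)) (i j : Nat) : Int := (g.getD i []).getD j 0
def pvSet2 (g : List (List Int)) (i j : Nat) (v : Int) : List (List Int) :=
  g.set i ((g.getD i []).set j v)

-- body of A's inner loop (same branches, same order; `continue` = first branch ends the body)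
def stepA (data : List (List Int)) (i : Nat) (g : List (List Int)) (j : Nat) : List (List Int) :=
  if i < data.length ∧ j < data.length then pvSet2 g i j (pvGet2 data i j)
  else if data.length ≤ j then pvSet2 g i j (increaseA (pvGet2 g i (j - data.length)))
  else pvSet2 g i j (increaseA (pvGet2 g (i - data.length) j))

-- body of A's outer loop
def rowA (data : List (List Int)) (g : List (List Int)) (i : Nat) : List (List Int) :=
  (List.range (5 * data.length)).foldl (stepA data i) g

def extend_data (data : List (List Int)) : List (List Int) :=
  (List.range (5 * data.length)).foldl (rowA data)
    (List.replicate (5 * data.length) (List.replicate (5 * data.length) (0 : Int)))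

-- ===== PORT B =====
-- `boosted(val, times)`: apply increase `times` times
def boostedA (val : Int) (times : Nat) : Int :=
  (List.range times).foldl (fun v _ => increaseA v) val

def extend_data_alt (data : List (List Int)) : List (List Int) :=
  (List.range (5 * data.length)).map (fun i =>
    (List.range (5 * data.length)).map (fun j =>
      boostedA ((data.getD (i % data.length) []).getD (j % data.length) 0)
        (i / data.length + j / data.length)))

-- ===== PRECONDITION & SPEC =====
-- Pre_ excludes exactly the ragged inputs (some row shorter than len(data)) on which
-- Python A raises IndexError at data[i][j].
def Pre_extend_data (data : List (List Int)) : Prop :=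
  ∀ row ∈ data, data.length ≤ row.length
instance (data : List (List Int)) : Decidable (Pre_extend_data data) := by
  unfold Pre_extend_data; infer_instance
def pvWitness_extend_data : List (List Int) := [[1, 9], [3, 4]]

def Spec_extend_data (data : List (List Int)) (out : List (List Int)) : Prop := out = extend_data_alt data
instance (data : List (List Int)) (out : List (List Int)) : Decidable (Spec_extend_data data out) := by unfold Spec_extend_data; infer_instance

-- ===== CLAIM (what is proved, stated in full; the proofs are below) =====
def Claim_equal_extend_data : Prop := ∀ (data : List (List Int)), Dom_extend_data data → Pre_extend_data data → Spec_extend_data data (extend_data data)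

-- ===== LEMMAS AND PROOFS =====

-- cell value of B's grid, as a function of the coordinates
def fA (data : List (List Int)) (i j : Nat) : Int :=
  boostedA ((data.getD (i % data.length) []).getD (j % data.length) 0)
    (i / data.length + j / data.length)

-- intermediate grid of A's computation: rows < i finished, row i finished up to column j
def SinG (data : List (List Int)) (i j : Nat) : List (List Int) :=
  (List.range (5 * data.length)).map (fun r =>
    if r < i then (List.range (5 * data.length)).map (fun c => fA data r c)
    else if r = i then (List.range (5 * data.length)).map (fun c => if c < j then fA data r c else 0)
    else List.replicate (5 * data.length) 0)

lemma boosted_succ (v : Int) (k : Nat) : boostedA v (k + 1) = increaseA (boostedA v k) := by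
  simp [boostedA, List.range_succ]

lemma f_base (data : List (List Int)) {i j : Nat} (hi : i < data.length) (hj : j < data.length) :
    fA data i j = pvGet2 data i j := by
  simp [fA, pvGet2, Nat.mod_eq_of_lt hi, Nat.mod_eq_of_lt hj,
    Nat.div_eq_of_lt hi, Nat.div_eq_of_lt hj, boostedA]

lemma f_right (data : List (List Int)) {i j : Nat} (hn : 0 < data.length)
    (hj : data.length ≤ j) : fA data i j = increaseA (fA data i (j - data.length)) := by
  obtain ⟨k, rfl⟩ : ∃ k, j = k + data.length := ⟨j - data.length, (Nat.sub_add_cancel hj).symm⟩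
  rw [Nat.add_sub_cancel, fA, fA, Nat.add_mod_right, Nat.add_div_right _ hn,
    ← Nat.add_assoc, boosted_succ]

lemma f_down (data : List (List Int)) {i j : Nat} (hn : 0 < data.length)
    (hi : data.length ≤ i) : fA data i j = increaseA (fA data (i - data.length) j) := by
  obtain ⟨k, rfl⟩ : ∃ k, i = k + data.length := ⟨i - data.length, (Nat.sub_add_cancel hi).symm⟩
  rw [Nat.add_sub_cancel, fA, fA, Nat.add_mod_right, Nat.add_div_right _ hn]
  rw [show k / data.length + 1 + j / data.length
      = k / data.length + j / data.length + 1 by omega, boosted_succ]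

lemma getD_mapRange {β : Type} (h : Nat → β) (x : β) {r m : Nat} (hr : r < m) :
    ((List.range m).map h).getD r x = h r := by
  simp [List.getD_eq_getElem?_getD, hr]

lemma set_mapRange {β : Type} (h : Nat → β) {r m : Nat} (hr : r < m) (v : β) :
    ((List.range m).map h).set r v
      = (List.range m).map (fun x => if x = r then v else h x) := by
  apply List.ext_getElem?
  intro k
  by_cases hk : k < m
  · by_cases hkr : k = r
    · subst hkr
      simp [hk]
    · have hrk : r ≠ k := fun h' => hkr h'.symm
      simp [hk, hrk, hkr]
  · simp [hk]

lemma step_lemma (data : List (List Int)) (hn : 0 < data.length) {i j : Nat}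
    (hi : i < 5 * data.length) (hj : j < 5 * data.length) :
    stepA data i (SinG data i j) j = SinG data i (j + 1) := by
  have hrowi : (SinG data i j).getD i []
      = (List.range (5 * data.length)).map (fun c => if c < j then fA data i c else 0) := by
    rw [SinG, getD_mapRange _ _ hi]; simp
  have hval : ∀ v, v = fA data i j →
      pvSet2 (SinG data i j) i j v = SinG data i (j + 1) := by
    intro v hv
    rw [pvSet2, hrowi, set_mapRange _ hj, SinG, set_mapRange _ hi, SinG]
    apply List.map_congr_left
    intro r hr
    by_cases hri : r = i
    · subst hri
      simp only [lt_irrefl, if_false]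
      apply List.map_congr_left
      intro c hc
      by_cases hcj : c = j
      · subst hcj; simp [hv]
      · by_cases hcj' : c < j
        · simp [hcj, hcj', Nat.lt_succ_of_lt hcj']
        · have h2 : ¬ c < j + 1 := by omega
          simp [hcj, hcj', h2]
    · simp [hri]
  rw [stepA]
  by_cases hb1 : i < data.length ∧ j < data.length
  · rw [if_pos hb1]
    exact hval _ (f_base data hb1.1 hb1.2).symm
  · rw [if_neg hb1]
    by_cases hb2 : data.length ≤ j
    · rw [if_pos hb2]
      apply hval
      rw [f_right data hn hb2]
      congr 1
      rw [pvGet2, hrowi, getD_mapRange _ _ (by omega : j - data.length < 5 * data.length)]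
      simp [Nat.sub_lt_self hn hb2]
    · rw [if_neg hb2]
      apply hval
      have hin : data.length ≤ i := by omega
      rw [f_down data hn hin]
      congr 1
      rw [pvGet2, SinG, getD_mapRange _ _ (by omega : i - data.length < 5 * data.length),
        if_pos (by omega : i - data.length < i), getD_mapRange _ _ hj]

lemma inner_lemma (data : List (List Int)) (hn : 0 < data.length) {i : Nat}
    (hi : i < 5 * data.length) :
    ∀ j, j ≤ 5 * data.length →
      (List.range j).foldl (stepA data i) (SinG data i 0) = SinG data i j := by
  intro j
  induction j with
  | zero => intro _; simp
  | succ k ih =>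
    intro hk
    rw [List.range_succ, List.foldl_append, ih (by omega)]
    exact step_lemma data hn hi (by omega)

lemma shift_lemma (data : List (List Int)) {i : Nat} (hi : i < 5 * data.length) :
    SinG data i (5 * data.length) = SinG data (i + 1) 0 := by
  rw [SinG, SinG]
  apply List.map_congr_left
  intro r hr
  have hrm : r < 5 * data.length := List.mem_range.mp hr
  by_cases h1 : r < i
  · simp [h1, Nat.lt_succ_of_lt h1]
  · by_cases h2 : r = i
    · subst h2
      simp only [lt_irrefl, if_false, if_pos (Nat.lt_succ_self r)]
      apply List.map_congr_left
      intro c hc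
      simp [List.mem_range.mp hc]
    · have h3 : ¬ r < i + 1 := by omega
      by_cases h4 : r = i + 1
      · rw [if_neg h1, if_neg h2, if_neg h3, if_pos h4]
        simp
      · simp [h1, h2, h3, h4]

lemma start_lemma (data : List (List Int)) :
    SinG data 0 0
      = List.replicate (5 * data.length) (List.replicate (5 * data.length) (0 : Int)) := by
  simp [SinG]

lemma outer_lemma (data : List (List Int)) (hn : 0 < data.length) :
    ∀ i, i ≤ 5 * data.length →
      (List.range i).foldl (rowA data)
        (List.replicate (5 * data.length) (List.replicate (5 * data.length) (0 : Int)))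
        = SinG data i 0 := by
  intro i
  induction i with
  | zero => intro _; simp [start_lemma]
  | succ k ih =>
    intro hk
    rw [List.range_succ, List.foldl_append, ih (by omega)]
    simp only [List.foldl_cons, List.foldl_nil]
    rw [rowA, inner_lemma data hn (by omega) _ (le_refl _),
      shift_lemma data (by omega)]

lemma final_lemma (data : List (List Int)) :
    SinG data (5 * data.length) 0 = extend_data_alt data := by
  rw [SinG, extend_data_alt]
  apply List.map_congr_left
  intro r hr
  rw [if_pos (List.mem_range.mp hr)]
  rfl

-- ===== VERDICT (by name: the statement is the Claim_ definition above) =====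
theorem extend_data_spec : Claim_equal_extend_data := by
  intro data _ _
  show extend_data data = extend_data_alt data
  by_cases hn : 0 < data.length
  · rw [extend_data, outer_lemma data hn _ (le_refl _), final_lemma]
  · have : data = [] := by
      cases data with
      | nil => rfl
      | cons a l => simp at hn
    subst this
    rfl
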